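-- pv_equiv track=rewrite | github.com/SparkBeyond/agentune | ci/scripts/generate-dev-deps.py | caret_to_pip
-- ===== SOURCE A (Python) =====
-- def caret_to_pip(name: str, spec: str) -> str:
--     """
--     Convert Poetry caret constraints to pip-compatible ranges.
--     Examples:
--       ^1.18.2   -> >=1.18.2,<2.0.0
--       ^0.12.11  -> >=0.12.11,<0.13.0
--       ^0.0.5    -> >=0.0.5,<0.0.6
--     """
--     if not spec.startswith("^"):
--         return f"{name}{spec}"
--
--     version = spec[1:]
--     parts = version.split(".")
--
--     while len(parts) < 3:
--         parts.append("0")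
--
--     major, minor, patch = map(int, parts[:3])
--
--     if major > 0:
--         upper = f"{major + 1}.0.0"
--     elif minor > 0:
--         upper = f"0.{minor + 1}.0"
--     else:
--         upper = f"0.0.{patch + 1}"
--
--     return f"{name}>={version},<{upper}"
-- ===== SOURCE B (Python) =====
-- def _bump(nums):
--     # Recursively build the exclusive upper bound: bump the head if it is
--     # positive (or it is the last component), zeroing everything after it;
--     # otherwise emit a literal "0." and recurse on the tail.
--     head, *tail = nums
--     if head > 0 or not tail:
--         return ".".join([str(head + 1)] + ["0"] * len(tail))
--     return "0." + _bump(tail)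
--
--
-- def caret_to_pip(name: str, spec: str) -> str:
--     if not spec.startswith("^"):
--         return f"{name}{spec}"
--     version = spec[1:]
--     nums = [int(p) for p in (version.split(".") + ["0", "0", "0"])[:3]]
--     return f"{name}>={version},<{_bump(nums)}"
-- ===== Notes on version B (the rewrite author's own statement) =====
-- stated objective: alternative
-- what changed: Replaces the while-loop padding and the flat three-way if/elif/else on (major,minor,patch) by slice padding plus a structurally recursive helper that consumes the component list, emitting a literal '0.' prefix per skipped component and a bumped head with a zero suffix at the stopping point.
import Mathlib
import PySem

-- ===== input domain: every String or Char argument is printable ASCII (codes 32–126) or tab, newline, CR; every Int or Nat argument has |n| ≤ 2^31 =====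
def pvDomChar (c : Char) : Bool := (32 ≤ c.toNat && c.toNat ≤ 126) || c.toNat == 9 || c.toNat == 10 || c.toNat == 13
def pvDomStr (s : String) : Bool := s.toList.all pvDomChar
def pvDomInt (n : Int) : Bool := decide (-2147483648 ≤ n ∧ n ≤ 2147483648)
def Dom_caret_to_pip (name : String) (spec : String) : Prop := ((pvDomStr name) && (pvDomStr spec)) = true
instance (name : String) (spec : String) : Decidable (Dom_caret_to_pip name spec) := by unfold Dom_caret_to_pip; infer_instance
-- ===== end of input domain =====

-- ===== PORT A =====
-- B replaces the while-loop padding and the flat three-way if/elif/else by slice padding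
-- plus a structural recursion over the component list; same values everywhere A returns.
-- A-side helper: the `while len(parts) < 3: parts.append("0")` loop
def pvPadTo3 (parts : List String) : List String :=
  if _h : parts.length < 3 then pvPadTo3 (parts ++ ["0"]) else parts
termination_by 3 - parts.length
decreasing_by simp; omega

def caret_to_pip (name : String) (spec : String) : String :=
  if PySem.Str.startswith spec "^" = false then name ++ spec
  else
    let version := PySem.Str.slice spec (some 1) none
    -- "." is never "", so split? is `some`; getD [] only discharges the Option
    let parts := pvPadTo3 ((PySem.Str.split? version ".").getD [])
    match (parts.take 3).map PySem.Int.ofStr? with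
    | [some major, some minor, some patch] =>
      let upper :=
        if 0 < major then PySem.Int.toStr (major + 1) ++ ".0.0"
        else if 0 < minor then "0." ++ PySem.Int.toStr (minor + 1) ++ ".0"
        else "0.0." ++ PySem.Int.toStr (patch + 1)
      name ++ ">=" ++ version ++ ",<" ++ upper
    | _ => ""  -- unreachable under Pre_ (Python raises ValueError there)

-- ===== PORT B =====
-- B-side helper `_bump`: recursion on the component list
def pvBump : List Int → String
  | [] => ""  -- unreachable: Python's `head, *tail = nums` would raise; nums always has 3 elements
  | (h :: t) =>
    if 0 < h || t.isEmpty then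
      PySem.Str.join "." (PySem.Int.toStr (h + 1) :: t.map (fun _ => "0"))
    else "0." ++ pvBump t

def caret_to_pip_alt (name : String) (spec : String) : String :=
  if PySem.Str.startswith spec "^" = false then name ++ spec
  else
    let version := PySem.Str.slice spec (some 1) none
    let parts := (((PySem.Str.split? version ".").getD []) ++ ["0", "0", "0"]).take 3
    -- the comprehension [int(p) for p in parts]: mapM, none = ValueError
    (parts.mapM PySem.Int.ofStr?).elim ""
      (fun nums => name ++ ">=" ++ version ++ ",<" ++ pvBump nums)

-- ===== PRECONDITION & SPEC =====
-- Pre_ excludes the caret specs whose first three dot-separated components (padded with "0") are not all int()-parseable: Python A raises ValueError there, and so does B.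
def Pre_caret_to_pip (name : String) (spec : String) : Prop :=
  PySem.Str.startswith spec "^" = true →
    ∀ p ∈ ((PySem.Str.split? (PySem.Str.slice spec (some 1) none) ".").getD []).take 3,
      (PySem.Int.ofStr? p).isSome = true
instance (name : String) (spec : String) : Decidable (Pre_caret_to_pip name spec) := by
  unfold Pre_caret_to_pip; infer_instance

def pvWitness_caret_to_pip : String × String := ("numpy", "^1.18.2")

def Spec_caret_to_pip (name : String) (spec : String) (out : String) : Prop := out = caret_to_pip_alt name spec
instance (name : String) (spec : String) (out : String) : Decidable (Spec_caret_to_pip name spec out) := by unfold Spec_caret_to_pip; infer_instance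

-- ===== CLAIM (what is proved, stated in full; the proofs are below) =====
def Claim_equal_caret_to_pip : Prop := ∀ (name : String) (spec : String), Dom_caret_to_pip name spec → Pre_caret_to_pip name spec → Spec_caret_to_pip name spec (caret_to_pip name spec)

-- ===== LEMMAS AND PROOFS =====

theorem pvWitness_ok :
    Dom_caret_to_pip pvWitness_caret_to_pip.1 pvWitness_caret_to_pip.2 ∧
    Pre_caret_to_pip pvWitness_caret_to_pip.1 pvWitness_caret_to_pip.2 := by decide

-- A's while-loop padding, cut at 3, is B's pad-with-three-zeros-and-slice
theorem pvPadTo3_take (l : List String) :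
    (pvPadTo3 l).take 3 = (l ++ ["0", "0", "0"]).take 3 := by
  match l with
  | [] => simp [pvPadTo3]
  | [a] => simp [pvPadTo3]
  | [a, b] => simp [pvPadTo3]
  | a :: b :: c :: rest =>
    rw [pvPadTo3]
    have h : ¬ (rest.length + 1 + 1 + 1 < 3) := by omega
    simp [h]

theorem pvJoin3 (s : String) : PySem.Str.join "." [s, "0", "0"] = s ++ ".0.0" := by
  apply String.toList_inj.mp
  simp [PySem.Chars.join_cons_cons, PySem.Chars.join_singleton]

theorem pvJoin2 (s : String) : PySem.Str.join "." [s, "0"] = s ++ ".0" := by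
  apply String.toList_inj.mp
  simp [PySem.Chars.join_cons_cons, PySem.Chars.join_singleton]

theorem pvJoin1 (s : String) : PySem.Str.join "." [s] = s := by
  apply String.toList_inj.mp
  simp [PySem.Chars.join_singleton]

-- A's three-branch upper bound equals B's recursive bump on the same triple
theorem pvUpper_eq (a b c : Int) :
    (if 0 < a then PySem.Int.toStr (a + 1) ++ ".0.0"
     else if 0 < b then "0." ++ PySem.Int.toStr (b + 1) ++ ".0"
     else "0.0." ++ PySem.Int.toStr (c + 1))
    = pvBump [a, b, c] := by
  by_cases ha : 0 < a
  · simp [pvBump, ha, pvJoin3]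
  · by_cases hb : 0 < b
    · simp [pvBump, ha, hb, pvJoin2]
      apply String.toList_inj.mp; simp
    · simp [pvBump, ha, hb, pvJoin1]
      apply String.toList_inj.mp; simp

-- ===== VERDICT (by name: the statement is the Claim_ definition above) =====
theorem caret_to_pip_spec : Claim_equal_caret_to_pip := by
  intro name spec _hdom hpre
  unfold Spec_caret_to_pip caret_to_pip caret_to_pip_alt
  cases hs : PySem.Str.startswith spec "^" with
  | false => rw [if_pos rfl]; rw [if_pos rfl]
  | true =>
    rw [if_neg (by simp : ¬(true = false))]
    rw [if_neg (by simp : ¬(true = false))]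
    dsimp only
    have hpre' := hpre hs
    rw [pvPadTo3_take]
    set l := (PySem.Str.split? (PySem.Str.slice spec (some 1) none) ".").getD []
    have h0 : (PySem.Int.ofStr? "0").isSome = true := by decide
    have key : ∃ x y z, ((l ++ ["0", "0", "0"]).take 3) = [x, y, z] ∧
        (PySem.Int.ofStr? x).isSome = true ∧ (PySem.Int.ofStr? y).isSome = true ∧
        (PySem.Int.ofStr? z).isSome = true := by
      match hm : l with
      | [] => exact ⟨"0", "0", "0", by simp, h0, h0, h0⟩
      | [x] => exact ⟨x, "0", "0", by simp, hpre' x (by simp [List.take]), h0, h0⟩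
      | [x, y] => exact ⟨x, y, "0", by simp, hpre' x (by simp [List.take]),
          hpre' y (by simp [List.take]), h0⟩
      | x :: y :: z :: rest =>
        exact ⟨x, y, z, by simp, hpre' x (by simp [List.take]),
          hpre' y (by simp [List.take]), hpre' z (by simp [List.take])⟩
    obtain ⟨x, y, z, hxyz, hx, hy, hz⟩ := key
    rw [hxyz]
    obtain ⟨a, ha⟩ := Option.isSome_iff_exists.mp hx
    obtain ⟨b, hb⟩ := Option.isSome_iff_exists.mp hy
    obtain ⟨c, hc⟩ := Option.isSome_iff_exists.mp hz
    simp only [List.map_cons, List.map_nil, List.mapM_cons, List.mapM_nil, ha, hb, hc, Option.pure_def, Option.bind_eq_bind, Option.bind_some, Option.elim]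
    rw [pvUpper_eq a b c]
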